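-- pv_equiv track=rewrite | github.com/IvanDerdicDer/FERStuff | OS/LABOSI/LAB_1/obrada.py | getMostImportant
-- ===== SOURCE A (Python) =====
-- def getMostImportant(waitList):
--     tmpList = waitList.copy()
--     toReturn = 0
--     for i in range(len(tmpList) - 1, -1, -1):
--         if tmpList[i]:
--             toReturn = i + 1
--             break
--     return toReturn
-- ===== SOURCE B (Python) =====
-- def getMostImportant(waitList):
--     tmp = waitList.copy()
--     toReturn = 0
--     for i, v in enumerate(tmp):
--         if v:
--             toReturn = i + 1
--     return toReturn
-- ===== Notes on version B (the rewrite author's own statement) =====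
-- stated objective: simpler
-- what changed: B scans forward once with enumerate, keeping the last truthy index+1 in an accumulator, instead of A's backward index loop with an early break.
import Mathlib
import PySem

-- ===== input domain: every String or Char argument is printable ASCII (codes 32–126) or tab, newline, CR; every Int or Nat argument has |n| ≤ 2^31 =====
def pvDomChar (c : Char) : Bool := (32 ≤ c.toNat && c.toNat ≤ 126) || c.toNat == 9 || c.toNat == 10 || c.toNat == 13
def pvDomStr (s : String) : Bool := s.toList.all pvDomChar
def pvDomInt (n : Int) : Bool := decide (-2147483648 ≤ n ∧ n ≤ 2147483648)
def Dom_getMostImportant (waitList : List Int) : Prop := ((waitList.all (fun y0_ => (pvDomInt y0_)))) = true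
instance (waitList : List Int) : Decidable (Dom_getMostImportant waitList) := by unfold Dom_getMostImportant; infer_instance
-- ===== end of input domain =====

-- B replaces A's backward index loop with an early break by a single forward
-- enumerate scan keeping the last truthy index+1 (simpler; return value only —
-- neither program mutates its argument).

-- ===== PORT A =====
-- A's backward 'for i in range(len-1, -1, -1)' loop with break: recursion over
-- the index list, early return on the first truthy element from the back.
def pvGoA (tmpList : List Int) : List Int → Int → Int
  | [], toReturn => toReturn
  | i :: rest, toReturn =>
      if PySem.List.pyGetD tmpList i 0 ≠ 0 then i + 1
      else pvGoA tmpList rest toReturn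

def getMostImportant (waitList : List Int) : Int :=
  let tmpList := waitList
  pvGoA tmpList (PySem.List.pyRange ((tmpList.length : Int) - 1) (-1) (-1)) 0

-- ===== PORT B =====
-- forward scan: for i, v in enumerate(tmp): if v: toReturn = i + 1
def getMostImportant_alt (waitList : List Int) : Int :=
  let tmp := waitList
  (PySem.List.enumerate tmp).foldl (fun toReturn p => if p.2 ≠ 0 then p.1 + 1 else toReturn) 0

-- ===== PRECONDITION & SPEC =====
def Spec_getMostImportant (waitList : List Int) (out : Int) : Prop := out = getMostImportant_alt waitList
instance (waitList : List Int) (out : Int) : Decidable (Spec_getMostImportant waitList out) := by unfold Spec_getMostImportant; infer_instance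

-- ===== CLAIM (what is proved, stated in full; the proofs are below) =====
def Claim_equal_getMostImportant : Prop := ∀ (waitList : List Int), Dom_getMostImportant waitList → Spec_getMostImportant waitList (getMostImportant waitList)

-- ===== LEMMAS AND PROOFS =====

-- goA only looks at indices in its range list
theorem pvGoA_congr (l₁ l₂ : List Int) (r : List Int) (acc : Int)
    (h : ∀ i ∈ r, PySem.List.pyGetD l₁ i 0 = PySem.List.pyGetD l₂ i 0) :
    pvGoA l₁ r acc = pvGoA l₂ r acc := by
  induction r with
  | nil => rfl
  | cons i rest ih =>
      simp only [pvGoA, h i (List.mem_cons_self ..)]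
      split_ifs with hv
      · rfl
      · exact ih (fun j hj => h j (List.mem_cons_of_mem _ hj))

theorem pvA_append (l : List Int) (x : Int) :
    getMostImportant (l ++ [x]) =
      (if x ≠ 0 then (l.length : Int) + 1 else getMostImportant l) := by
  have hlen : ((l ++ [x]).length : Int) - 1 = (l.length : Int) := by
    simp
  have hcons : PySem.List.pyRange ((l.length : Int)) (-1) (-1)
      = (l.length : Int) :: PySem.List.pyRange ((l.length : Int) - 1) (-1) (-1) :=
    PySem.List.pyRange_neg_one_cons (by omega)
  have hx : PySem.List.pyGetD (l ++ [x]) (l.length : Int) 0 = x := by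
    simp
  have hrest : pvGoA (l ++ [x]) (PySem.List.pyRange ((l.length : Int) - 1) (-1) (-1)) 0
      = pvGoA l (PySem.List.pyRange ((l.length : Int) - 1) (-1) (-1)) 0 := by
    apply pvGoA_congr
    intro i hi
    rw [PySem.List.mem_pyRange_neg_one] at hi
    have h0 : 0 ≤ i := by omega
    have h1 : i < (l.length : Int) := by omega
    rw [PySem.List.pyGetD_eq_getElem (l ++ [x]) 0 h0 (by simp; omega),
        PySem.List.pyGetD_eq_getElem l 0 h0 h1]
    exact List.getElem_append_left (by omega)
  simp only [getMostImportant, hlen, hcons, pvGoA, hx, hrest]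

theorem pvB_append (l : List Int) (x : Int) :
    getMostImportant_alt (l ++ [x]) =
      (if x ≠ 0 then (l.length : Int) + 1 else getMostImportant_alt l) := by
  simp only [getMostImportant_alt, PySem.List.enumerate_append, List.foldl_append,
    PySem.List.enumerate_cons, PySem.List.enumerate_nil, List.foldl_cons, List.foldl_nil]
  split_ifs with hv
  · simp
  · simp

-- ===== VERDICT (by name: the statement is the Claim_ definition above) =====
theorem getMostImportant_spec : Claim_equal_getMostImportant := by
  intro waitList hd
  unfold Spec_getMostImportant
  induction waitList using List.reverseRecOn with
  | nil => rfl
  | append_singleton l x ih =>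
      rw [pvA_append, pvB_append, ih (by simp only [Dom_getMostImportant, List.all_append, Bool.and_eq_true] at hd; exact hd.1)]
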